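-- pv_equiv track=rewrite | github.com/eth-cscs/pyfirecrest | firecrest/utilities.py | sched_state_completed
-- ===== SOURCE A (Python) =====
-- def sched_state_completed(state):
--     completion_states = {
--         'BOOT_FAIL',
--         'CANCELLED',
--         'COMPLETED',
--         'DEADLINE',
--         'FAILED',
--         'NODE_FAIL',
--         'OUT_OF_MEMORY',
--         'PREEMPTED',
--         'TIMEOUT',
--         'F', # PBS state 'F': job Finished
--     }
--     if state:
--         # Make sure all the steps include one of the completion states
--         return all(
--             any(cs in s for cs in completion_states) for s in state.split(',')
--         )
--
--     return False
-- ===== SOURCE B (Python) =====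
-- # Single streaming pass over the string: no split(), no per-step substring scans.
-- # We walk the positions left to right, count a step as done the first time a
-- # completion-state literal starts at the current position (literals contain no
-- # comma, so a match never crosses a step boundary), and fold the per-step flag
-- # into an all-steps accumulator at each comma.
-- COMPLETION_STATES = ('BOOT_FAIL', 'CANCELLED', 'COMPLETED', 'DEADLINE', 'FAILED',
--                      'NODE_FAIL', 'OUT_OF_MEMORY', 'PREEMPTED', 'TIMEOUT', 'F')
--
-- def sched_state_completed(state):
--     if not state:
--         return False
--     all_ok = True
--     cur_ok = False
--     for i in range(len(state)):
--         if state[i] == ',':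
--             all_ok = all_ok and cur_ok
--             cur_ok = False
--         elif not cur_ok and state.startswith(COMPLETION_STATES, i):
--             cur_ok = True
--     return all_ok and cur_ok
-- ===== Notes on version B (the rewrite author's own statement) =====
-- stated objective: alternative
-- what changed: Replaces comma-splitting plus a per-step any-substring scan by one streaming pass over the string: a per-step flag set by a positional prefix test against the literal tuple (matches cannot cross step boundaries) is folded into an all-steps accumulator at every separator.
import Mathlib
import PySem

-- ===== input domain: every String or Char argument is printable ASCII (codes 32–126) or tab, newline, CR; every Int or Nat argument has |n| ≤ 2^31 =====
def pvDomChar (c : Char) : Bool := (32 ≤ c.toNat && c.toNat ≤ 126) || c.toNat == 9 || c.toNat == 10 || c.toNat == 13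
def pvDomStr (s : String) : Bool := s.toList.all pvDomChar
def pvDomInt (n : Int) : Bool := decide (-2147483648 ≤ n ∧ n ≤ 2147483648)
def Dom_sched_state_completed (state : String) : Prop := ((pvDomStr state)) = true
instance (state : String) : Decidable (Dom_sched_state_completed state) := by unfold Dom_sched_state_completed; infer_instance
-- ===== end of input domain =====

-- B is a single streaming pass over the string (comma folds a per-step flag into an
-- all-steps accumulator; a literal match is detected by startswith at each position),
-- replacing A's split-then-scan; objective: alternative.

-- ===== PORT A =====
def sched_state_completed (state : String) : Bool :=
  let completion_states : PySem.Set String := PySem.Set.ofList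
    ["BOOT_FAIL", "CANCELLED", "COMPLETED", "DEADLINE", "FAILED",
     "NODE_FAIL", "OUT_OF_MEMORY", "PREEMPTED", "TIMEOUT", "F"]
  if state ≠ "" then
    -- state.split(',') and 'cs in s' are exact via PySem.Chars.splitOn / PySem.Chars.isIn
    (PySem.Chars.splitOn state.toList ",".toList).all
      (fun s => (completion_states : List String).any (fun cs => PySem.Chars.isIn cs.toList s))
  else
    false

-- ===== PORT B =====
def pvCompletionStates : List String :=
  ["BOOT_FAIL", "CANCELLED", "COMPLETED", "DEADLINE", "FAILED",
   "NODE_FAIL", "OUT_OF_MEMORY", "PREEMPTED", "TIMEOUT", "F"]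

-- the for-i-in-range loop of Source B: walking index i = walking the suffix of the chars;
-- state.startswith(tuple, i) is exact via PySem.Chars.startswith on the suffix
def pvLoop : List Char → Bool → Bool → Bool
  | [], allOk, curOk => allOk && curOk
  | c :: rest, allOk, curOk =>
    if c = ',' then pvLoop rest (allOk && curOk) false
    else if !curOk && pvCompletionStates.any
        (fun cs => PySem.Chars.startswith (c :: rest) cs.toList) then
      pvLoop rest allOk true
    else
      pvLoop rest allOk curOk

def sched_state_completed_alt (state : String) : Bool :=
  if state = "" then false
  else pvLoop state.toList true false

-- ===== PRECONDITION & SPEC =====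
def Spec_sched_state_completed (state : String) (out : Bool) : Prop := out = sched_state_completed_alt state
instance (state : String) (out : Bool) : Decidable (Spec_sched_state_completed state out) := by unfold Spec_sched_state_completed; infer_instance

-- ===== CLAIM (what is proved, stated in full; the proofs are below) =====
def Claim_equal_sched_state_completed : Prop := ∀ (state : String), Dom_sched_state_completed state → Spec_sched_state_completed state (sched_state_completed state)

-- ===== LEMMAS AND PROOFS =====

-- A's per-step test (the Set.ofList of the 10 literals is the literal list itself)
def pvStepOK (s : List Char) : Bool :=
  pvCompletionStates.any (fun cs => PySem.Chars.isIn cs.toList s)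

-- clean recursive model of state.split(',')
def pvSplit : List Char → List (List Char)
  | [] => [[]]
  | c :: rest => if c = ',' then [] :: pvSplit rest else (pvSplit rest).modifyHead (c :: ·)

theorem pvSplit_ne_nil (l : List Char) : pvSplit l ≠ [] := by
  induction l with
  | nil => simp [pvSplit]
  | cons c rest ih =>
    simp only [pvSplit]
    split_ifs
    · simp
    · cases h : pvSplit rest with
      | nil => exact absurd h ih
      | cons q qs => simp [List.modifyHead]

theorem pvSplit_cons_exists (l : List Char) : ∃ p ps, pvSplit l = p :: ps := by
  cases h : pvSplit l with
  | nil => exact absurd h (pvSplit_ne_nil l)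
  | cons q qs => exact ⟨q, qs, rfl⟩

theorem pvGo_spec (fuel : Nat) (l cur : List Char) (acc : List (List Char))
    (p : List Char) (ps : List (List Char))
    (hf : l.length ≤ fuel) (hs : pvSplit l = p :: ps) :
    PySem.Chars.splitOn.go [','] fuel l cur acc = acc.reverse ++ (cur.reverse ++ p) :: ps := by
  induction fuel generalizing l cur acc p ps with
  | zero =>
    have hl : l = [] := List.length_eq_zero_iff.mp (Nat.le_zero.mp hf)
    subst hl
    simp [pvSplit] at hs
    obtain ⟨rfl, rfl⟩ := hs
    simp [PySem.Chars.splitOn.go]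
  | succ fuel ih =>
    cases l with
    | nil =>
      simp [pvSplit] at hs
      obtain ⟨rfl, rfl⟩ := hs
      simp [PySem.Chars.splitOn.go]
    | cons c rest =>
      obtain ⟨q, qs, hq⟩ := pvSplit_cons_exists rest
      by_cases hc : c = ','
      · subst hc
        simp only [pvSplit, if_pos trivial, hq] at hs
        obtain ⟨rfl, rfl⟩ := List.cons.inj hs
        have hpre : [','].isPrefixOf (',' :: rest) = true := by
          simp [List.isPrefixOf]
        simp only [PySem.Chars.splitOn.go, hpre, if_pos, List.length_cons,
          List.length_nil, List.drop_succ_cons, List.drop_zero]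
        rw [ih rest [] (cur.reverse :: acc) q qs (by simpa using Nat.le_of_succ_le_succ hf) hq]
        simp
      · have hpre : [','].isPrefixOf (c :: rest) = false := by
          simp only [List.isPrefixOf, Bool.and_eq_false_iff]
          left
          simp only [beq_eq_false_iff_ne, ne_eq]
          exact fun h => hc h.symm
        simp only [pvSplit, if_neg hc, hq, List.modifyHead] at hs
        obtain ⟨rfl, rfl⟩ := List.cons.inj hs
        simp only [PySem.Chars.splitOn.go, hpre]
        rw [if_neg (by simp), ih rest (c :: cur) acc q qs (by simpa using Nat.le_of_succ_le_succ hf) hq]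
        simp

theorem pvSplitOn_eq (l : List Char) (p : List Char) (ps : List (List Char))
    (hs : pvSplit l = p :: ps) :
    PySem.Chars.splitOn l [','] = p :: ps := by
  unfold PySem.Chars.splitOn
  rw [pvGo_spec (l.length + 1) l [] [] p ps (by omega) hs]
  simp

theorem pvSplit_head (l : List Char) (p : List Char) (ps : List (List Char))
    (hs : pvSplit l = p :: ps) : p = l.takeWhile (· ≠ ',') := by
  induction l generalizing p ps with
  | nil => simp [pvSplit] at hs; simp [hs.1]
  | cons c rest ih =>
    obtain ⟨q, qs, hq⟩ := pvSplit_cons_exists rest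
    by_cases hc : c = ','
    · subst hc
      simp only [pvSplit, if_pos trivial] at hs
      obtain ⟨rfl, _⟩ := List.cons.inj hs
      simp [List.takeWhile]
    · simp only [pvSplit, if_neg hc, hq, List.modifyHead] at hs
      obtain ⟨rfl, _⟩ := List.cons.inj hs
      simp [List.takeWhile, hc, ih q qs hq]

-- a comma-free prefix of l is a prefix of l's first comma-separated segment
theorem pvPrefix_takeWhile (cs l : List Char) (hc : ',' ∉ cs) (hp : cs <+: l) :
    cs <+: l.takeWhile (· ≠ ',') := by
  induction cs generalizing l with
  | nil => simp
  | cons a cs ih =>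
    obtain ⟨t, rfl⟩ := hp
    have ha : a ≠ ',' := fun h => hc (h ▸ List.mem_cons_self)
    have hd : decide (a ≠ ',') = true := by simp [ha]
    simp only [List.cons_append, List.takeWhile, hd]
    exact List.cons_prefix_cons.mpr ⟨rfl, ih (cs ++ t) (fun h => hc (List.mem_cons_of_mem _ h)) ⟨t, rfl⟩⟩

theorem pvStates_comma_free (cs : String) (h : cs ∈ pvCompletionStates) : ',' ∉ cs.toList := by
  fin_cases h <;> decide

theorem pvLoop_spec (l : List Char) (A C : Bool) (p : List Char) (ps : List (List Char))
    (hs : pvSplit l = p :: ps) :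
    pvLoop l A C = (A && ((C || pvStepOK p) && ps.all pvStepOK)) := by
  induction l generalizing A C p ps with
  | nil =>
    simp [pvSplit] at hs
    obtain ⟨rfl, rfl⟩ := hs
    have h0 : pvStepOK [] = false := by decide
    simp [pvLoop, h0]
  | cons c rest ih =>
    obtain ⟨q, qs, hq⟩ := pvSplit_cons_exists rest
    by_cases hc : c = ','
    · subst hc
      simp only [pvSplit, if_pos trivial] at hs
      obtain ⟨rfl, rfl⟩ := List.cons.inj hs
      rw [show pvLoop (',' :: rest) A C = pvLoop rest (A && C) false from by simp [pvLoop],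
          ih (A && C) false q qs hq, hq]
      have h0 : pvStepOK [] = false := by decide
      simp only [h0, List.all_cons, Bool.or_false, Bool.false_or]
      cases A <;> cases C <;> simp
    · simp only [pvSplit, if_neg hc, hq, List.modifyHead] at hs
      obtain ⟨rfl, rfl⟩ := List.cons.inj hs
      have hhead : q = rest.takeWhile (· ≠ ',') := pvSplit_head rest q qs hq
      by_cases hhit : pvCompletionStates.any
          (fun cs => PySem.Chars.startswith (c :: rest) cs.toList) = true
      · -- some literal starts right here: the whole first segment is OK
        have hstep : pvStepOK (c :: q) = true := by
          obtain ⟨cs, hmem, hpre⟩ := List.any_eq_true.mp hhit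
          have hpre' : cs.toList <+: c :: rest := (PySem.Chars.startswith_iff _ _).mp hpre
          have hcf := pvStates_comma_free cs hmem
          have hseg : cs.toList <+: (c :: rest).takeWhile (· ≠ ',') :=
            pvPrefix_takeWhile _ _ hcf hpre'
          have heq : (c :: rest).takeWhile (· ≠ ',') = c :: q := by
            simp [List.takeWhile, hc, hhead]
          rw [heq] at hseg
          exact List.any_eq_true.mpr ⟨cs, hmem,
            (PySem.Chars.isIn_iff_infix _ _).mpr hseg.isInfix⟩
        cases hC : C
        · rw [show pvLoop (c :: rest) A false = pvLoop rest A true from by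
              simp [pvLoop, hc, hhit], ih A true q qs hq]
          simp [hstep]
        · rw [show pvLoop (c :: rest) A true = pvLoop rest A true from by
              simp [pvLoop, hc], ih A true q qs hq]
          simp
      · -- no literal starts here: the segment test is unchanged by dropping c
        have hstep : pvStepOK (c :: q) = pvStepOK q := by
          have hnot : ∀ cs ∈ pvCompletionStates, ¬ cs.toList <+: c :: rest := by
            intro cs hmem hpre
            exact hhit (List.any_eq_true.mpr ⟨cs, hmem,
              (PySem.Chars.startswith_iff _ _).mpr hpre⟩)
          cases h2 : pvStepOK q with
          | true =>
            obtain ⟨cs, hmem, hin⟩ := List.any_eq_true.mp h2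
            exact List.any_eq_true.mpr ⟨cs, hmem, by
              rw [PySem.Chars.isIn_iff_infix] at hin ⊢
              exact hin.trans (List.suffix_cons c q).isInfix⟩
          | false =>
            by_contra h1
            rw [Bool.not_eq_false] at h1
            obtain ⟨cs, hmem, hin⟩ := List.any_eq_true.mp h1
            rw [PySem.Chars.isIn_iff_infix] at hin
            rcases List.infix_cons_iff.mp hin with hpre | hinf
            · have hq_pre : q <+: rest := hhead ▸ List.takeWhile_prefix _
              exact hnot cs hmem (hpre.trans (List.cons_prefix_cons.mpr ⟨rfl, hq_pre⟩))
            · have : pvStepOK q = true := List.any_eq_true.mpr ⟨cs, hmem,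
                (PySem.Chars.isIn_iff_infix _ _).mpr hinf⟩
              rw [h2] at this
              exact Bool.false_ne_true this
        cases hC : C
        · rw [show pvLoop (c :: rest) A false = pvLoop rest A false from by
              simp [pvLoop, hc, hhit], ih A false q qs hq]
          simp [hstep]
        · rw [show pvLoop (c :: rest) A true = pvLoop rest A true from by
              simp [pvLoop, hc], ih A true q qs hq]
          simp

theorem pvSet_eq : (PySem.Set.ofList
    ["BOOT_FAIL", "CANCELLED", "COMPLETED", "DEADLINE", "FAILED",
     "NODE_FAIL", "OUT_OF_MEMORY", "PREEMPTED", "TIMEOUT", "F"] : List String) =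
    pvCompletionStates := by decide

-- ===== VERDICT (by name: the statement is the Claim_ definition above) =====
theorem sched_state_completed_spec : Claim_equal_sched_state_completed := by
  intro state _
  unfold Spec_sched_state_completed sched_state_completed sched_state_completed_alt
  by_cases hs : state = ""
  · simp [hs]
  · simp only [hs, if_false, ne_eq, not_false_eq_true, if_true]
    obtain ⟨p, ps, hp⟩ := pvSplit_cons_exists state.toList
    rw [pvSet_eq, show ",".toList = [','] from rfl, pvSplitOn_eq _ p ps hp,
        pvLoop_spec _ true false p ps hp]
    simp only [List.all_cons, Bool.true_and, Bool.false_or]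
    rfl
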